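-- pv_equiv track=rewrite | github.com/BuidlAI-AiDrop/aidrop-core | ai_deduction/feature_engineering.py | _check_protocol_interactions
-- ===== SOURCE A (Python) =====
-- from typing import Dict, List, Any, Optional
--
-- def _check_protocol_interactions(contract_interactions: List[Dict]) -> Dict[str, int]:
--     """주요 프로토콜과의 상호작용 여부 확인"""
--     # 주요 프로토콜 컨트랙트 주소 (실제로는 DB나 설정에서 가져올 것)
--     protocols = {
--         'uniswap': ['0x1f9840a85d5aF5bf1D1762F925BDADdC4201F984'.lower()],  # Uniswap 예시 주소
--         'opensea': ['0x7Be8076f4EA4A4AD08075C2508e481d6C946D12b'.lower()],  # OpenSea 예시 주소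
--         'aave': ['0x7d2768dE32b0b80b7a3454c06BdAc94A69DDc7A9'.lower()],     # Aave 예시 주소
--     }
--
--     results = {}
--     contract_addresses = [c.get('address', '').lower() for c in contract_interactions]
--
--     for protocol_name, addresses in protocols.items():
--         # 해당 프로토콜 컨트랙트와의 상호작용 여부
--         interaction = any(addr in contract_addresses for addr in addresses)
--         results[f'used_{protocol_name}'] = 1 if interaction else 0
--
--     return results
-- ===== SOURCE B (Python) =====
-- def _check_protocol_interactions(contract_interactions):
--     """One pass over the interactions with a reverse address->protocol table."""
--     protocols = {
--         'uniswap': ['0x1f9840a85d5aF5bf1D1762F925BDADdC4201F984'.lower()],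
--         'opensea': ['0x7Be8076f4EA4A4AD08075C2508e481d6C946D12b'.lower()],
--         'aave': ['0x7d2768dE32b0b80b7a3454c06BdAc94A69DDc7A9'.lower()],
--     }
--     addr_to_proto = {addr: name for name, addrs in protocols.items() for addr in addrs}
--     results = {f'used_{name}': 0 for name in protocols}
--     for c in contract_interactions:
--         addr = c.get('address', '').lower()
--         if addr in addr_to_proto:
--             results[f'used_{addr_to_proto[addr]}'] = 1
--     return results
-- ===== Notes on version B (the rewrite author's own statement) =====
-- stated objective: alternative
-- what changed: Replaces A's per-protocol any()-scan over a materialized list of all lowered addresses with a pre-initialized results dict and a single pass over the interactions using a reverse address-to-protocol lookup table.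
import Mathlib
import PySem

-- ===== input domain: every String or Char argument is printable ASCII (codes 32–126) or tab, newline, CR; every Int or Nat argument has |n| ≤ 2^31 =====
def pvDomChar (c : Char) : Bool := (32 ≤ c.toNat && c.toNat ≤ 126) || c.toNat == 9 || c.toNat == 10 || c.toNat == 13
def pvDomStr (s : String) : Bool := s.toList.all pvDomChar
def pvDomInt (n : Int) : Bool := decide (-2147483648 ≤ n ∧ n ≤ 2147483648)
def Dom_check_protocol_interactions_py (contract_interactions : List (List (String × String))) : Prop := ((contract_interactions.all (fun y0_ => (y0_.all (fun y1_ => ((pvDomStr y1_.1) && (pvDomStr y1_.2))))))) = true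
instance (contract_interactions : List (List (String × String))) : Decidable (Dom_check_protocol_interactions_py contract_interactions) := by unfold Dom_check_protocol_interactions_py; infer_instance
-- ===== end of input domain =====

-- B replaces A's per-protocol any()-scan over the list of all lowered addresses with a
-- pre-initialized results dict and one pass over the interactions via a reverse
-- address→protocol lookup table (objective: alternative decomposition, same cost).

-- shared trivial helper: c.get('address', '').lower()
def pvLow (c : List (String × String)) : String :=
  PySem.Str.lower ((PySem.Dict.mk c).getD "address" "")

-- ===== PORT A =====
def check_protocol_interactions_py (contract_interactions : List (List (String × String))) : List (String × Int) :=
  -- protocols = {...} (addresses lowered)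
  let protocols : PySem.Dict String (List String) := PySem.Dict.mk
    [("uniswap", [PySem.Str.lower "0x1f9840a85d5aF5bf1D1762F925BDADdC4201F984"]),
     ("opensea", [PySem.Str.lower "0x7Be8076f4EA4A4AD08075C2508e481d6C946D12b"]),
     ("aave",    [PySem.Str.lower "0x7d2768dE32b0b80b7a3454c06BdAc94A69DDc7A9"])]
  -- contract_addresses = [c.get('address', '').lower() for c in contract_interactions]
  let contract_addresses : List String := contract_interactions.map pvLow
  -- for protocol_name, addresses in protocols.items():
  --   interaction = any(addr in contract_addresses for addr in addresses)
  --   results[f'used_{protocol_name}'] = 1 if interaction else 0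
  let results : PySem.Dict String Int :=
    protocols.items.foldl (fun results p =>
      let interaction := p.2.any (fun addr => contract_addresses.contains addr)
      results.insert ("used_" ++ p.1) (if interaction then 1 else 0)) (PySem.Dict.mk [])
  results.items

-- ===== PORT B =====
-- addr_to_proto = {addr: name for name, addrs in protocols.items() for addr in addrs}
def pvAddrToProto : PySem.Dict String String := PySem.Dict.mk
  [(PySem.Str.lower "0x1f9840a85d5aF5bf1D1762F925BDADdC4201F984", "uniswap"),
   (PySem.Str.lower "0x7Be8076f4EA4A4AD08075C2508e481d6C946D12b", "opensea"),
   (PySem.Str.lower "0x7d2768dE32b0b80b7a3454c06BdAc94A69DDc7A9", "aave")]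

-- one iteration of B's loop body
def pvBStep (results : PySem.Dict String Int) (c : List (String × String)) : PySem.Dict String Int :=
  let addr := pvLow c
  match pvAddrToProto.get? addr with
  | some name => results.insert ("used_" ++ name) 1
  | none => results

def check_protocol_interactions_py_alt (contract_interactions : List (List (String × String))) : List (String × Int) :=
  -- results = {f'used_{name}': 0 for name in protocols}
  let init : PySem.Dict String Int := PySem.Dict.mk
    [("used_uniswap", 0), ("used_opensea", 0), ("used_aave", 0)]
  -- for c in contract_interactions: if addr in addr_to_proto: results[f'used_{...}'] = 1
  (contract_interactions.foldl pvBStep init).items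

-- ===== PRECONDITION & SPEC =====
def Spec_check_protocol_interactions_py (contract_interactions : List (List (String × String))) (out : List (String × Int)) : Prop := out = check_protocol_interactions_py_alt contract_interactions
instance (contract_interactions : List (List (String × String))) (out : List (String × Int)) : Decidable (Spec_check_protocol_interactions_py contract_interactions out) := by unfold Spec_check_protocol_interactions_py; infer_instance

-- ===== CLAIM (what is proved, stated in full; the proofs are below) =====
def Claim_equal_check_protocol_interactions_py : Prop := ∀ (contract_interactions : List (List (String × String))), Dom_check_protocol_interactions_py contract_interactions → Spec_check_protocol_interactions_py contract_interactions (check_protocol_interactions_py contract_interactions)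

-- ===== LEMMAS AND PROOFS =====

theorem pvLowU : PySem.Str.lower "0x1f9840a85d5aF5bf1D1762F925BDADdC4201F984" = "0x1f9840a85d5af5bf1d1762f925bdaddc4201f984" := by decide
theorem pvLowO : PySem.Str.lower "0x7Be8076f4EA4A4AD08075C2508e481d6C946D12b" = "0x7be8076f4ea4a4ad08075c2508e481d6c946d12b" := by decide
theorem pvLowA : PySem.Str.lower "0x7d2768dE32b0b80b7a3454c06BdAc94A69DDc7A9" = "0x7d2768de32b0b80b7a3454c06bdac94a69ddc7a9" := by decide

-- B's loop, from an arbitrary 3-flag state, sets each flag iff its address occurs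
theorem pv_b_loop (l : List (List (String × String))) (x y z : Int) :
    l.foldl pvBStep (PySem.Dict.mk [("used_uniswap", x), ("used_opensea", y), ("used_aave", z)])
    = PySem.Dict.mk
      [("used_uniswap", if (l.map pvLow).contains "0x1f9840a85d5af5bf1d1762f925bdaddc4201f984" then 1 else x),
       ("used_opensea", if (l.map pvLow).contains "0x7be8076f4ea4a4ad08075c2508e481d6c946d12b" then 1 else y),
       ("used_aave",    if (l.map pvLow).contains "0x7d2768de32b0b80b7a3454c06bdac94a69ddc7a9" then 1 else z)] := by
  induction l generalizing x y z with
  | nil => simp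
  | cons c l ih =>
    simp only [List.foldl_cons, List.map_cons, List.contains_cons]
    by_cases h1 : pvLow c = "0x1f9840a85d5af5bf1d1762f925bdaddc4201f984"
    · simp [pvBStep, pvAddrToProto, PySem.Dict.get?, PySem.Dict.insert, pvLowU, pvLowO, pvLowA, h1, ih]
    · by_cases h2 : pvLow c = "0x7be8076f4ea4a4ad08075c2508e481d6c946d12b"
      · simp [pvBStep, pvAddrToProto, PySem.Dict.get?, PySem.Dict.insert, pvLowU, pvLowO, pvLowA, h2, ih]
      · by_cases h3 : pvLow c = "0x7d2768de32b0b80b7a3454c06bdac94a69ddc7a9"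
        · simp [pvBStep, pvAddrToProto, PySem.Dict.get?, PySem.Dict.insert, pvLowU, pvLowO, pvLowA, h3, ih]
        · simp [pvBStep, pvAddrToProto, PySem.Dict.get?, pvLowU, pvLowO, pvLowA, ih,
                Ne.symm h1, Ne.symm h2, Ne.symm h3]

-- ===== VERDICT (by name: the statement is the Claim_ definition above) =====
theorem check_protocol_interactions_py_spec : Claim_equal_check_protocol_interactions_py := by
  intro ci _
  unfold Spec_check_protocol_interactions_py check_protocol_interactions_py check_protocol_interactions_py_alt
  simp only [pv_b_loop, PySem.Dict.insert, pvLowU, pvLowO, pvLowA]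
  simp
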